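-- pv_equiv track=rewrite | github.com/midhuns-001/hackerrank | create_pairs.py | solution
-- ===== SOURCE A (Python) =====
-- def solution(A):
--     # write your code in Python 3.6
--     dict = {}
--     for i in A:
--         if i in dict.keys():
--             dict[i] = dict[i]+1
--         else:
--             dict[i] = 1
--     for key,value in dict.items():
--         if ((value % 2) != 0):
--             return False
--         else:
--             return True
-- ===== SOURCE B (Python) =====
-- def solution(A):
--     seen = False
--     first = None
--     count = 0
--     for i in A:
--         if not seen:
--             seen = True
--             first = i
--             count = 1
--         elif i == first:
--             count += 1
--     if not seen:
--         return None
--     return count % 2 == 0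
-- ===== Notes on version B (the rewrite author's own statement) =====
-- stated objective: simpler
-- what changed: B replaces A's dict-of-all-counts plus a first-item scan with a single O(1)-space pass that tracks only the first element seen and its occurrence count, returning the parity of that count (None on empty input).
import Mathlib
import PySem

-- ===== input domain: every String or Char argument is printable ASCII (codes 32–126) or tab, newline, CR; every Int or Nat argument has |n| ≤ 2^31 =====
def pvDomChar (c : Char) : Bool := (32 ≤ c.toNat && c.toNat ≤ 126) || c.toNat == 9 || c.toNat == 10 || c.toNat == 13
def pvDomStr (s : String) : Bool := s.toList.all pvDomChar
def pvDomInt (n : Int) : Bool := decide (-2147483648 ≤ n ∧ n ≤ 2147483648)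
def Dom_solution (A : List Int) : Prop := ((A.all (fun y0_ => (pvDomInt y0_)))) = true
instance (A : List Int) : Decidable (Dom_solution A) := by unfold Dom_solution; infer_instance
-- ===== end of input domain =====

-- B: one pass tracking only the first element and its count (parity), instead of A's dict of all counts; return value only.

-- ===== PORT A =====
-- the counting loop: if i in dict: dict[i] += 1 else: dict[i] = 1
def solA_step (d : PySem.Dict Int Int) (i : Int) : PySem.Dict Int Int :=
  if d.contains i then d.insert i (d.getD i 0 + 1) else d.insert i 1

def solution (A : List Int) : Option Bool :=
  -- 'for key,value in dict.items(): return …' returns on the FIRST item (or falls through to None)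
  match (A.foldl solA_step PySem.Dict.empty).items with
  | [] => none
  | (_, v) :: _ => if PySem.Int.mod v 2 ≠ 0 then some false else some true

-- ===== PORT B =====
-- state: (seen/first as Option, count)
def solB_step (s : Option Int × Int) (i : Int) : Option Int × Int :=
  match s.1 with
  | none => (some i, 1)
  | some f => if i == f then (some f, s.2 + 1) else (some f, s.2)

def solution_alt (A : List Int) : Option Bool :=
  match A.foldl solB_step (none, 0) with
  | (none, _) => none
  | (some _, c) => some (PySem.Int.mod c 2 == 0)

-- ===== PRECONDITION & SPEC =====
def Spec_solution (A : List Int) (out : Option Bool) : Prop := out = solution_alt A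
instance (A : List Int) (out : Option Bool) : Decidable (Spec_solution A out) := by unfold Spec_solution; infer_instance

-- ===== CLAIM (what is proved, stated in full; the proofs are below) =====
def Claim_equal_solution : Prop := ∀ (A : List Int), Dom_solution A → Spec_solution A (solution A)

-- ===== LEMMAS AND PROOFS =====

-- A's counting step is the standard 'd[i] = d.get(i,0) + 1' step
theorem solA_step_eq (d : PySem.Dict Int Int) (i : Int) :
    solA_step d i = d.insert i (d.getD i 0 + 1) := by
  unfold solA_step
  by_cases h : d.contains i
  · simp [h]
  · have h0 : d.contains i = false := by simpa using h
    simp [h0, PySem.Dict.getD_of_not_contains]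

theorem solA_fold_eq_counter (A : List Int) :
    A.foldl solA_step PySem.Dict.empty = PySem.Dict.counter A := by
  have hstep : solA_step = fun d i => d.insert i (d.getD i 0 + 1) := by
    funext d i; exact solA_step_eq d i
  rw [hstep]
  exact PySem.Dict.foldl_insert_getD_add_one_eq_counter A

-- B's loop, once the first element is fixed, just counts occurrences of it
theorem solB_fold (xs : List Int) (f : Int) (c : Int) :
    xs.foldl solB_step (some f, c) = (some f, c + (xs.count f : Int)) := by
  induction xs generalizing c with
  | nil => simp
  | cons x xs ih =>
    simp only [List.foldl_cons, solB_step, List.count_cons]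
    by_cases h : x = f
    · subst h; simp [ih]; ring
    · have hb : (x == f) = false := by simpa using h
      simp [hb, ih]

theorem solution_spec : Claim_equal_solution := by
  intro A _
  unfold Spec_solution solution solution_alt
  rw [solA_fold_eq_counter, PySem.Dict.items_counter]
  cases A with
  | nil => simp
  | cons x xs =>
    rw [PySem.Set.ofList_cons, List.map_cons, List.foldl_cons]
    have hB : xs.foldl solB_step (solB_step (none, 0) x) = (some x, 1 + (xs.count x : Int)) := by
      show xs.foldl solB_step (some x, 1) = _
      exact solB_fold xs x 1
    rw [hB]
    have hc : ((x :: xs).count x : Int) = 1 + (xs.count x : Int) := by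
      rw [List.count_cons_self]; push_cast; ring
    rw [hc]
    by_cases h : (1 + (xs.count x : Int)).fmod 2 = 0 <;> simp [PySem.Int.mod, h]
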